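-- pv_equiv track=rewrite | github.com/BugDevelopments/AdventOfCode | day18part2.py | edge_rest
-- ===== SOURCE A (Python) =====
-- def edge_rest(SL,R):
--   res = 0
--   for c,d in zip(R[::2],R[1::2]):
--     for x,y in zip(SL[::2],SL[1::2]):
--       if d<x: # c,d must be in an odd interval
--         break
--       if x<=c and d<=y: # then it must hold that x<=c<d<=y
--         res += d-c-1+(x==c)+(y==d)
--         break
--   return res
-- ===== SOURCE B (Python) =====
-- def edge_rest(SL, R):
--     iv = list(zip(SL[::2], SL[1::2]))
--     n = len(iv)
--     pm = []          # pm[i] = max start among iv[0..i]; nondecreasing, so bisectable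
--     m = None
--     for x, _ in iv:
--         if m is None or x > m:
--             m = x
--         pm.append(m)
--     total = 0
--     for c, d in zip(R[::2], R[1::2]):
--         lo, hi = 0, n            # binary search: first i with d < pm[i] == first i with d < iv[i][0]
--         while lo < hi:
--             mid = (lo + hi) // 2
--             if d < pm[mid]:
--                 hi = mid
--             else:
--                 lo = mid + 1
--         stop = lo
--         hit = 0
--         while hit < stop and not (iv[hit][0] <= c and d <= iv[hit][1]):
--             hit += 1
--         if hit < stop:
--             x, y = iv[hit]
--             total += d - c - 1 + (x == c) + (y == d)
--     return total
-- ===== Notes on version B (the rewrite author's own statement) =====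
-- stated objective: alternative
-- what changed: B pairs the intervals once, precomputes the prefix-maximum of the interval starts (always nondecreasing, no sortedness assumed) so the break index 'first interval with d < x' is found by binary search, then scans only below that index for the containing interval, instead of A's single interleaved scan per (c,d) pair.
import Mathlib
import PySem

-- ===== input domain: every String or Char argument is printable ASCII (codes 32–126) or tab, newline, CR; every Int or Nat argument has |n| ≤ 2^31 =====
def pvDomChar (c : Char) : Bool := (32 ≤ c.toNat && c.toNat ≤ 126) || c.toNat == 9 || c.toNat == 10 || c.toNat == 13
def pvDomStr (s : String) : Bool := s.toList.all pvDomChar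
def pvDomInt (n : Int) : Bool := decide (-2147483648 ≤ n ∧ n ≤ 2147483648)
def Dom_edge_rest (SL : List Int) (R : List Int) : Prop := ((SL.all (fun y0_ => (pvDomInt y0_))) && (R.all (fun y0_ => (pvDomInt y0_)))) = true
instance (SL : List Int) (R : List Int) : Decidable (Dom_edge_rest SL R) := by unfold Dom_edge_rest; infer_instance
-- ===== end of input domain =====

-- B pairs the intervals once and precomputes the prefix-maximum of starts so the break index is found by binary search, then scans only below it; a different algorithm of similar measured cost.

-- zip(xs[::2], xs[1::2]) — the pairing both Pythons perform verbatim
def pvPairs (xs : List Int) : List (Int × Int) :=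
  ((PySem.List.slice? xs none none 2).getD []).zip ((PySem.List.slice? xs (some 1) none 2).getD [])

-- ===== PORT A =====
-- A's inner loop: first pair with d<x gives 0 (break), first containing pair gives the contribution (break)
def pvInnerA (c d : Int) : List (Int × Int) → Int
  | [] => 0
  | (x, y) :: rest =>
    if d < x then 0
    else if x ≤ c ∧ d ≤ y then
      d - c - 1 + (if x == c then 1 else 0) + (if y == d then 1 else 0)
    else pvInnerA c d rest

def edge_rest (SL : List Int) (R : List Int) : Int :=
  (pvPairs R).foldl (fun res cd => res + pvInnerA cd.1 cd.2 (pvPairs SL)) 0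

-- ===== PORT B =====
-- pm[i] = max start among iv[0..i] ('for x,_ in iv: m = ...; pm.append(m)')
def pvPrefMax : List (Int × Int) → Option Int → List Int
  | [], _ => []
  | p :: l, m? =>
    let m := match m? with
      | none => p.1
      | some m0 => if p.1 > m0 then p.1 else m0
    m :: pvPrefMax l (some m)

-- 'while lo < hi: mid = (lo+hi)//2; ...' — binary search for the first index with d < pm[idx]
-- pm[mid] is always in range when called with hi ≤ len pm, so getD is exact here
def pvBisect (pm : List Int) (d : Int) (lo hi : Nat) : Nat :=
  if _h : lo < hi then
    let mid := (lo + hi) / 2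
    if d < pm.getD mid 0 then pvBisect pm d lo mid else pvBisect pm d (mid + 1) hi
  else lo
termination_by hi - lo
decreasing_by all_goals omega

-- 'while hit < stop and not pred(iv[hit]): hit += 1' — first match below the bound, else the bound
def pvBoundedIdx (p : Int × Int → Bool) : Nat → List (Int × Int) → Nat
  | 0, _ => 0
  | _, [] => 0
  | bound + 1, a :: l => if p a then 0 else 1 + pvBoundedIdx p bound l

def pvContribB (iv : List (Int × Int)) (pm : List Int) (c d : Int) : Int :=
  let stop := pvBisect pm d 0 iv.length
  let hit := pvBoundedIdx (fun p => decide (p.1 ≤ c ∧ d ≤ p.2)) stop iv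
  if hit < stop then
    match iv[hit]? with
    | some (x, y) => d - c - 1 + (if x == c then 1 else 0) + (if y == d then 1 else 0)
    | none => 0
  else 0

def edge_rest_alt (SL : List Int) (R : List Int) : Int :=
  let iv := pvPairs SL
  let pm := pvPrefMax iv none
  (pvPairs R).foldl (fun tot cd => tot + pvContribB iv pm cd.1 cd.2) 0

-- ===== PRECONDITION & SPEC =====
def Spec_edge_rest (SL : List Int) (R : List Int) (out : Int) : Prop := out = edge_rest_alt SL R
instance (SL : List Int) (R : List Int) (out : Int) : Decidable (Spec_edge_rest SL R out) := by unfold Spec_edge_rest; infer_instance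

-- ===== CLAIM (what is proved, stated in full; the proofs are below) =====
def Claim_equal_edge_rest : Prop := ∀ (SL : List Int) (R : List Int), Dom_edge_rest SL R → Spec_edge_rest SL R (edge_rest SL R)

-- ===== LEMMAS AND PROOFS =====
-- first index with a property, used only as a proof-side characterisation of the binary search
def pvFirstIdx (p : Int × Int → Bool) : List (Int × Int) → Nat
  | [] => 0
  | a :: l => if p a then 0 else 1 + pvFirstIdx p l

theorem firstIdx_le_length (p : Int × Int → Bool) (l : List (Int × Int)) :
    pvFirstIdx p l ≤ l.length := by
  induction l with
  | nil => simp [pvFirstIdx]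
  | cons a l ih =>
    simp only [pvFirstIdx, List.length_cons]
    split
    · omega
    · omega

-- prefix-max characterisation: d < pm[j] iff the accumulator already exceeds d or the
-- first index with d < x is ≤ j
theorem prefMax_lt (d : Int) (iv : List (Int × Int)) :
    ∀ (m? : Option Int) (j : Nat), j < iv.length →
      (d < (pvPrefMax iv m?).getD j 0 ↔
        ((∃ m0, m? = some m0 ∧ d < m0) ∨ pvFirstIdx (fun p => decide (d < p.1)) iv ≤ j)) := by
  induction iv with
  | nil => intro _ j hj; simp at hj
  | cons a l ih =>
    intro m? j hj
    obtain ⟨x, y⟩ := a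
    have hfi : pvFirstIdx (fun p => decide (d < p.1)) ((x, y) :: l)
        = if d < x then 0 else 1 + pvFirstIdx (fun p => decide (d < p.1)) l := by
      simp [pvFirstIdx]
    have hfl := firstIdx_le_length (fun p => decide (d < p.1)) l
    match j with
    | 0 =>
      cases m? with
      | none =>
        simp only [pvPrefMax, List.getD_cons_zero, hfi]
        constructor
        · intro h; right; simp [h]
        · rintro (⟨m0, hm, _⟩ | h)
          · exact absurd hm (by simp)
          · split at h
            · assumption
            · omega
      | some m0 =>
        simp only [pvPrefMax, List.getD_cons_zero, hfi]
        constructor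
        · intro h
          split at h
          · by_cases hdx : d < x
            · right; simp [hdx]
            · left; exact ⟨m0, rfl, by omega⟩
          · left; exact ⟨m0, rfl, h⟩
        · rintro (⟨m1, hm, hd⟩ | h)
          · have hmm : m0 = m1 := Option.some.inj hm
            split <;> omega
          · have hdx : d < x := by
              by_cases hdx : d < x
              · exact hdx
              · rw [if_neg hdx] at h; omega
            split <;> omega
    | j + 1 =>
      have hl : j < l.length := by simp at hj; omega
      cases m? with
      | none =>
        simp only [pvPrefMax, List.getD_cons_succ, hfi]
        rw [ih (some x) j hl]
        constructor
        · rintro (⟨m1, hm, hd⟩ | h)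
          · have hmm : x = m1 := Option.some.inj hm
            right; split <;> omega
          · right; split <;> omega
        · rintro (⟨m1, hm, _⟩ | h)
          · exact absurd hm (by simp)
          · split at h
            · rename_i hdx; exact Or.inl ⟨x, rfl, hdx⟩
            · right; omega
      | some m0 =>
        simp only [pvPrefMax, List.getD_cons_succ, hfi]
        rw [ih (some (if x > m0 then x else m0)) j hl]
        constructor
        · rintro (⟨m1, hm, hd⟩ | h)
          · have hmm : m1 = if x > m0 then x else m0 := (Option.some.inj hm).symm
            subst hmm
            split at hd
            · by_cases hdx : d < x
              · right; simp [hdx]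
              · left; exact ⟨m0, rfl, by omega⟩
            · left; exact ⟨m0, rfl, hd⟩
          · right; split <;> omega
        · rintro (⟨m1, hm, hd⟩ | h)
          · have hmm : m0 = m1 := Option.some.inj hm
            exact Or.inl ⟨_, rfl, by split <;> omega⟩
          · split at h
            · rename_i hdx
              exact Or.inl ⟨_, rfl, by split <;> omega⟩
            · right; omega

-- the binary search finds exactly the first index s with d < pm[idx], given the
-- monotone characterisation of that predicate
theorem bisect_eq (pm : List Int) (d : Int) (s : Nat)
    (hc : ∀ j (_ : j < pm.length), (d < pm.getD j 0 ↔ s ≤ j)) :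
    ∀ lo hi, lo ≤ s → s ≤ hi → hi ≤ pm.length → pvBisect pm d lo hi = s := by
  intro lo hi
  induction lo, hi using pvBisect.induct pm d with
  | case1 lo hi h mid hd ih =>
    intro hlo hhi hlen
    rw [pvBisect, dif_pos h]
    simp only [mid] at hd
    rw [if_pos hd]
    exact ih hlo ((hc _ (by omega)).mp hd) (by omega)
  | case2 lo hi h mid hd ih =>
    intro hlo hhi hlen
    rw [pvBisect, dif_pos h]
    simp only [mid] at hd
    rw [if_neg hd]
    have hms : ¬ s ≤ (lo + hi) / 2 := fun hle => hd ((hc _ (by omega)).mpr hle)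
    exact ih (by omega) hhi hlen
  | case3 lo hi h =>
    intro hlo hhi _
    rw [pvBisect, dif_neg h]
    omega

theorem prefMax_length (iv : List (Int × Int)) (m? : Option Int) :
    (pvPrefMax iv m?).length = iv.length := by
  induction iv generalizing m? with
  | nil => simp [pvPrefMax]
  | cons a l ih => simp [pvPrefMax, ih]

theorem bisect_eq_firstIdx (iv : List (Int × Int)) (d : Int) :
    pvBisect (pvPrefMax iv none) d 0 iv.length
      = pvFirstIdx (fun p => decide (d < p.1)) iv := by
  apply bisect_eq
  · intro j hj
    rw [prefMax_lt d iv none j (by rwa [prefMax_length] at hj)]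
    simp
  · exact Nat.zero_le _
  · exact firstIdx_le_length _ _
  · rw [prefMax_length]

theorem fi_cons (q : Int × Int → Bool) (a : Int × Int) (l : List (Int × Int)) :
    pvFirstIdx q (a :: l) = if q a then 0 else 1 + pvFirstIdx q l := rfl

theorem bi_cons (q : Int × Int → Bool) (b : Nat) (a : Int × Int) (l : List (Int × Int)) :
    pvBoundedIdx q (b + 1) (a :: l) = if q a then 0 else pvBoundedIdx q b l + 1 := by
  simp [pvBoundedIdx, Nat.add_comm]

theorem contrib_eq (c d : Int) (iv : List (Int × Int)) :
    pvInnerA c d iv = pvContribB iv (pvPrefMax iv none) c d := by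
  have hkey : pvContribB iv (pvPrefMax iv none) c d
      = (let stop := pvFirstIdx (fun p => decide (d < p.1)) iv;
         let hit := pvBoundedIdx (fun p => decide (p.1 ≤ c ∧ d ≤ p.2)) stop iv;
         if hit < stop then
           match iv[hit]? with
           | some (x, y) => d - c - 1 + (if x == c then 1 else 0) + (if y == d then 1 else 0)
           | none => 0
         else 0) := by
    simp only [pvContribB, bisect_eq_firstIdx]
  rw [hkey]
  clear hkey
  induction iv with
  | nil => simp [pvInnerA, pvFirstIdx, pvBoundedIdx]
  | cons a l ih =>
    obtain ⟨x, y⟩ := a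
    by_cases h1 : d < x
    · simp [pvInnerA, fi_cons, h1, pvBoundedIdx]
    · by_cases h2 : x ≤ c ∧ d ≤ y
      · simp only [fi_cons, h1, h2, decide_false, Bool.false_eq_true, if_false,
          Nat.add_comm 1, bi_cons]
        simp [pvInnerA, h1, h2]
      · have hx : pvInnerA c d ((x, y) :: l) = pvInnerA c d l := by
          simp [pvInnerA, h1, h2]
        rw [hx, ih]
        simp only [fi_cons, h1, decide_false, Bool.false_eq_true, if_false,
          Nat.add_comm 1, bi_cons, h2]
        simp only [Nat.add_lt_add_iff_right, List.getElem?_cons_succ]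

-- ===== VERDICT (by name: the statement is the Claim_ definition above) =====
theorem edge_rest_spec : Claim_equal_edge_rest := by
  intro SL R _
  unfold Spec_edge_rest edge_rest edge_rest_alt
  simp only [contrib_eq]
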